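-- pv_equiv track=rewrite | github.com/francis-lan/bladder_medi_ai | define_work.py | pre_correct_count
-- ===== SOURCE A (Python) =====
-- def pre_correct_count(movement):
--     pcc = []
--     for i in range(len(movement)-1, 0, -1):
--         if movement[i] < 0:
--             pcc.append(abs(movement[i]))
--         elif movement[i] > 0:
--             return pcc
--     return pcc
-- ===== SOURCE B (Python) =====
-- def pre_correct_count(movement):
--     # Two stages: (1) extract the trailing run of non-positive values by scanning
--     # backward over movement[1:] up to the rightmost strictly-positive element,
--     # (2) one filtered pass turning the negatives of that run into absolute values.
--     rev = movement[1:]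
--     rev.reverse()
--     boundary = len(rev)
--     for i, x in enumerate(rev):
--         if x > 0:
--             boundary = i
--             break
--     return [abs(x) for x in rev[:boundary] if x < 0]
-- ===== Notes on version B (the rewrite author's own statement) =====
-- stated objective: idiomatic
-- what changed: Replaces A's single backward index loop with early return by a two-stage decomposition: first locate the boundary (rightmost positive after index 0) over the reversed tail, then a filtered comprehension over the run before it.
import Mathlib
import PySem

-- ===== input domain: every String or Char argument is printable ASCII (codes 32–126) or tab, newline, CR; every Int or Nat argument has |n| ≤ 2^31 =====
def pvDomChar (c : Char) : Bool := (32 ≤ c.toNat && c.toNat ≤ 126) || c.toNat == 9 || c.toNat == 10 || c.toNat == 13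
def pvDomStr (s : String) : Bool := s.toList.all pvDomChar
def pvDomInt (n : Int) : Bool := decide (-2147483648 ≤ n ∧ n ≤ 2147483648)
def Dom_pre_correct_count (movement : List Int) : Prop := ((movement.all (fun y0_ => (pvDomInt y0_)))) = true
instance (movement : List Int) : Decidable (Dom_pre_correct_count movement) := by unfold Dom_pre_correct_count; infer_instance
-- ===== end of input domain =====

-- B replaces A's single early-return backward index loop by a two-stage decomposition
-- (find the boundary, then one filtered pass); same cost, more idiomatic.

-- ===== PORT A =====
-- the loop 'for i in range(len(movement)-1, 0, -1)' with early return;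
-- every i produced by the range is in bounds, so pyGetD's default 0 is never used
def pvLoopA (movement : List Int) : List Int → List Int → List Int
  | [], pcc => pcc
  | i :: rest, pcc =>
    let v := PySem.List.pyGetD movement i 0
    if v < 0 then pvLoopA movement rest (pcc ++ [|v|])
    else if v > 0 then pcc
    else pvLoopA movement rest pcc

def pre_correct_count (movement : List Int) : List Int :=
  pvLoopA movement (PySem.List.pyRange ((movement.length : Int) - 1) 0 (-1)) []

-- ===== PORT B =====
-- 'boundary' loop of Source B: first index of a strictly positive element, else length
def pvBoundary : List Int → Nat
  | [] => 0
  | x :: r => if x > 0 then 0 else 1 + pvBoundary r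

def pre_correct_count_alt (movement : List Int) : List Int :=
  let rev := (PySem.List.slice movement (some 1) none).reverse
  let boundary := pvBoundary rev
  ((rev.take boundary).filter (fun x => x < 0)).map (fun x => |x|)

-- ===== PRECONDITION & SPEC =====
def Spec_pre_correct_count (movement : List Int) (out : List Int) : Prop := out = pre_correct_count_alt movement
instance (movement : List Int) (out : List Int) : Decidable (Spec_pre_correct_count movement out) := by unfold Spec_pre_correct_count; infer_instance

-- ===== CLAIM (what is proved, stated in full; the proofs are below) =====
def Claim_equal_pre_correct_count : Prop := ∀ (movement : List Int), Dom_pre_correct_count movement → Spec_pre_correct_count movement (pre_correct_count movement)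

-- ===== LEMMAS AND PROOFS =====

-- abstract result of the scan over a value list
def pvG : List Int → List Int
  | [] => []
  | x :: r => if x < 0 then |x| :: pvG r else if x > 0 then [] else pvG r

theorem pvLoopA_eq_pvG (movement : List Int) :
    ∀ (idxs pcc : List Int),
      pvLoopA movement idxs pcc = pcc ++ pvG (idxs.map (fun i => PySem.List.pyGetD movement i 0)) := by
  intro idxs
  induction idxs with
  | nil => intro pcc; simp [pvLoopA, pvG]
  | cons i rest ih =>
    intro pcc
    by_cases h1 : PySem.List.pyGetD movement i 0 < 0
    · simp [pvLoopA, pvG, h1, ih]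
    · by_cases h2 : PySem.List.pyGetD movement i 0 > 0
      · simp [pvLoopA, pvG, h1, h2]
      · simp [pvLoopA, pvG, h1, h2, ih]

theorem pvG_eq_filter (rev : List Int) :
    pvG rev = ((rev.take (pvBoundary rev)).filter (fun x => x < 0)).map (fun x => |x|) := by
  induction rev with
  | nil => simp [pvG, pvBoundary]
  | cons x r ih =>
    by_cases h2 : x > 0
    · have h1 : ¬ x < 0 := by omega
      simp [pvG, pvBoundary, h1, h2]
    · by_cases h1 : x < 0
      · simp [pvG, pvBoundary, h1, h2, List.take_succ_cons, ih,
          show (1 + pvBoundary r) = pvBoundary r + 1 from Nat.add_comm _ _]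
      · simp [pvG, pvBoundary, h1, h2, List.take_succ_cons, ih,
          show (1 + pvBoundary r) = pvBoundary r + 1 from Nat.add_comm _ _]

theorem pvRange_map_eq (movement : List Int) :
    (PySem.List.pyRange ((movement.length : Int) - 1) 0 (-1)).map
        (fun i => PySem.List.pyGetD movement i 0)
      = (movement.drop 1).reverse := by
  have h : PySem.List.pyRange ((movement.length : Int) - 1) 0 (-1)
      = (PySem.List.pyRange 1 (movement.length : Int) 1).reverse := by
    rw [PySem.List.pyRange_neg_one_eq_reverse]
    norm_num
  rw [h, List.map_reverse]
  have h2 : (PySem.List.pyRange 1 (movement.length : Int) 1).map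
      (fun i => PySem.List.pyGetD movement i 0) = movement.drop 1 := by
    have := PySem.List.map_pyGetD_pyRange (xs := movement) (a := 1) (d := 0) (by norm_num)
    simpa using this
  rw [h2]

-- ===== VERDICT (by name: the statement is the Claim_ definition above) =====
theorem pre_correct_count_spec : Claim_equal_pre_correct_count := by
  intro movement _
  unfold Spec_pre_correct_count pre_correct_count pre_correct_count_alt
  rw [pvLoopA_eq_pvG, pvRange_map_eq]
  simp [PySem.List.slice_from_one, pvG_eq_filter]
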